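-- pv_equiv track=rewrite | github.com/Cesar-1337/Lab2 | lab2Python.py | prnt_string
-- ===== SOURCE A (Python) =====
-- def prnt_string(s):
--     substr = ""
--     max_substr = ""
--     cnt_operations = 0
--     for i in range(len(s) // 2):
--         substr += s[i]
--         next_substr = s[len(substr):len(substr) + i + 1]
--         if substr == next_substr:
--             max_substr = substr
--
--     cnt_operations = len(max_substr)
--     substr = max_substr + max_substr
--     if len(max_substr) > 0:
--         cnt_operations += 1
--
--     for i in range(len(substr), len(s)):
--         substr += s[i]
--         cnt_operations += 1
--
--     return cnt_operations
-- ===== SOURCE B (Python) =====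
-- def prnt_string(s):
--     n = len(s)
--     # largest k with s[:k] == s[k:2k]; scan downward and stop at the first hit
--     for k in range(n // 2, 0, -1):
--         if s[:k] == s[k:2 * k]:
--             return n - k + 1
--     return n
-- ===== Notes on version B (the rewrite author's own statement) =====
-- stated objective: simpler
-- what changed: Instead of building the prefix character by character, testing every k ascending, and counting the tail in a second loop, B scans k downward from n//2, returns the closed form n-k+1 at the first doubled prefix found, and n when none exists.
import Mathlib
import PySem

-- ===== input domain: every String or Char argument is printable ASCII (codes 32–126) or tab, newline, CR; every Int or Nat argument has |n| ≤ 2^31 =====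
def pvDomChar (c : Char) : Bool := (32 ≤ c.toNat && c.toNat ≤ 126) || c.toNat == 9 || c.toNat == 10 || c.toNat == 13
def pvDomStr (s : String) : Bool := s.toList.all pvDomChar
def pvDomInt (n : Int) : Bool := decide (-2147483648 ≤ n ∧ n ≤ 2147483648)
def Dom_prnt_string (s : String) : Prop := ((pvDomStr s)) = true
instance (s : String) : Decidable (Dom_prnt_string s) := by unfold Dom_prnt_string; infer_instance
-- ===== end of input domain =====

-- ===== PORT A =====
-- first loop of A: for i in range(len(s)//2): substr += s[i]; if substr == s[len(substr):len(substr)+i+1]: max_substr = substr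
def prntA_loop1 (l : List Char) (m : Nat) (i : Nat) (substr maxs : List Char) :
    List Char × List Char :=
  if h : i < m then
    let substr' := substr ++ ((PySem.List.pyGet? l (i : Int)).elim [] (fun c => [c]))
    let next := PySem.List.slice l (some (substr'.length : Int))
        (some ((substr'.length : Int) + (i : Int) + 1))
    prntA_loop1 l m (i + 1) substr' (if substr' = next then substr' else maxs)
  else (substr, maxs)
termination_by m - i

-- second loop of A: for i in range(len(substr), len(s)): substr += s[i]; cnt += 1
def prntA_loop2 (l : List Char) (n : Nat) (i : Nat) (substr : List Char) (cnt : Int) : Int :=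
  if h : i < n then
    prntA_loop2 l n (i + 1) (substr ++ ((PySem.List.pyGet? l (i : Int)).elim [] (fun c => [c])))
      (cnt + 1)
  else cnt
termination_by n - i

def prnt_string (s : String) : Int :=
  let l := s.toList
  let p := prntA_loop1 l (l.length / 2) 0 [] []
  let maxs := p.2
  let cnt : Int := (maxs.length : Int)
  let substr := maxs ++ maxs
  let cnt := if maxs.length > 0 then cnt + 1 else cnt
  prntA_loop2 l l.length substr.length substr cnt

-- ===== PORT B =====
-- for k in range(n//2, 0, -1): if s[:k] == s[k:2*k]: return n-k+1  — findk returns that k, or 0 if no k matches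
def prntB_findk (l : List Char) : Nat → Nat
  | 0 => 0
  | k + 1 =>
    if PySem.List.slice l none (some ((k + 1 : Nat) : Int)) =
        PySem.List.slice l (some ((k + 1 : Nat) : Int)) (some ((2 * (k + 1) : Nat) : Int)) then
      k + 1
    else prntB_findk l k

def prnt_string_alt (s : String) : Int :=
  let l := s.toList
  let n := l.length
  let k := prntB_findk l (n / 2)
  if k = 0 then (n : Int) else (n : Int) - (k : Int) + 1

-- ===== PRECONDITION & SPEC =====
def Spec_prnt_string (s : String) (out : Int) : Prop := out = prnt_string_alt s
instance (s : String) (out : Int) : Decidable (Spec_prnt_string s out) := by unfold Spec_prnt_string; infer_instance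

-- ===== CLAIM (what is proved, stated in full; the proofs are below) =====
def Claim_equal_prnt_string : Prop := ∀ (s : String), Dom_prnt_string s → Spec_prnt_string s (prnt_string s)

-- ===== LEMMAS AND PROOFS =====

theorem findk_le (l : List Char) (j : Nat) : prntB_findk l j ≤ j := by
  induction j with
  | zero => simp [prntB_findk]
  | succ k ih =>
    simp only [prntB_findk]
    split
    · exact le_refl _
    · exact Nat.le_succ_of_le ih

-- the condition tested by both programs at k
theorem findk_succ (l : List Char) (k : Nat) :
    prntB_findk l (k + 1) =
      if l.take (k + 1) = (l.drop (k + 1)).take (k + 1) then k + 1 else prntB_findk l k := by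
  have h1 : PySem.List.slice l none (some ((k + 1 : Nat) : Int)) = l.take (k + 1) :=
    PySem.List.slice_to_natCast l (k + 1)
  have h2 : PySem.List.slice l (some ((k + 1 : Nat) : Int)) (some ((2 * (k + 1) : Nat) : Int)) =
      (l.drop (k + 1)).take (k + 1) := by
    rw [PySem.List.slice_natCast l (k + 1) (2 * (k + 1))]
    congr 1
    omega
  simp only [prntB_findk, h1, h2]

theorem loop1_invariant (l : List Char) (m : Nat) (hm : m ≤ l.length) :
    ∀ i, i ≤ m →
      (prntA_loop1 l m i (l.take i) (l.take (prntB_findk l i))).2 =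
        l.take (prntB_findk l m) := by
  intro i hi
  induction hmi : m - i generalizing i with
  | zero =>
    have : i = m := by omega
    subst this
    rw [prntA_loop1]
    simp
  | succ d ih =>
    have hlt : i < m := by omega
    have hin : i < l.length := by omega
    have hsub : l.take i ++ (PySem.List.pyGet? l (i : Int)).elim [] (fun c => [c]) =
        l.take (i + 1) := by
      rw [PySem.List.pyGet?_natCast, List.getElem?_eq_getElem hin, List.take_add_one,
        List.getElem?_eq_getElem hin]
      rfl
    rw [prntA_loop1, dif_pos hlt]
    simp only [hsub]
    have hlen : (l.take (i + 1)).length = i + 1 := by simp; omega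
    rw [hlen]
    have h2 : ((i + 1 : Nat) : Int) + (i : Int) + 1 = ((2 * (i + 1) : Nat) : Int) := by
      push_cast; ring
    rw [h2, PySem.List.slice_natCast]
    have hdrop : (l.drop (i + 1)).take (2 * (i + 1) - (i + 1)) = (l.drop (i + 1)).take (i + 1) := by
      congr 1; omega
    rw [hdrop]
    have hmax : (if l.take (i + 1) = (l.drop (i + 1)).take (i + 1) then l.take (i + 1)
        else l.take (prntB_findk l i)) = l.take (prntB_findk l (i + 1)) := by
      rw [findk_succ]
      split_ifs <;> rfl
    rw [hmax]
    exact ih (i + 1) (by omega) (by omega)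

theorem loop2_count (l : List Char) (n : Nat) :
    ∀ i substr cnt, i ≤ n → prntA_loop2 l n i substr cnt = cnt + ((n : Int) - (i : Int)) := by
  intro i
  induction hni : n - i generalizing i with
  | zero =>
    intro substr cnt hi
    have : i = n := by omega
    subst this
    rw [prntA_loop2]
    simp
  | succ d ih =>
    intro substr cnt hi
    have hlt : i < n := by omega
    rw [prntA_loop2, dif_pos hlt]
    rw [ih (i + 1) (by omega) _ _ (by omega)]
    push_cast
    ring

-- ===== VERDICT (by name: the statement is the Claim_ definition above) =====
theorem prnt_string_spec : Claim_equal_prnt_string := by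
  intro s _
  unfold Spec_prnt_string prnt_string prnt_string_alt
  simp only []
  set l := s.toList with hl
  set n := l.length with hn
  set m := n / 2 with hmdef
  have hm : m ≤ n := Nat.div_le_self _ _
  have h2m : 2 * m ≤ n := by omega
  set K := prntB_findk l m with hK
  have hKm : K ≤ m := findk_le l m
  have hinv := loop1_invariant l m hm 0 (Nat.zero_le _)
  simp only [List.take_zero, prntB_findk] at hinv
  rw [hinv]
  have hKlen : (l.take K).length = K := by simp; omega
  rw [List.length_append, hKlen]
  rw [loop2_count l n (K + K) _ _ (by omega)]
  rcases Nat.eq_zero_or_pos K with h0 | hpos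
  · simp [h0]
  · rw [if_pos (by omega), if_neg (by omega)]
    push_cast
    omega
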